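-- pv_equiv track=rewrite | github.com/GCaiazza/PassGen | password_generator/generator.py | generate_case_variants
-- ===== SOURCE A (Python) =====
-- import itertools
--
-- def generate_case_variants(word):
--     """
--     Genera tutte le combinazioni possibili di lettere minuscole e maiuscole per una data parola.
--
--     Input:
--         word (str): la parola da trasformare.
--     Output:
--         set: insieme di varianti con combinazioni di case.
--     """
--     possibilities = []
--     for ch in word:
--         if ch.isalpha():
--             possibilities.append([ch.lower(), ch.upper()])
--         else:
--             possibilities.append([ch])
--     return {''.join(prod) for prod in itertools.product(*possibilities)}
-- ===== SOURCE B (Python) =====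
-- def generate_case_variants(word):
--     result = {''}
--     for ch in word:
--         options = [ch.lower(), ch.upper()] if ch.isalpha() else [ch]
--         result = {prefix + c for prefix in result for c in options}
--     return result
-- ===== Notes on version B (the rewrite author's own statement) =====
-- stated objective: alternative
-- what changed: Replaces the collect-options-then-one-itertools.product pass with an incremental accumulator: the variant set starts from the single empty prefix and is cross-extended one character at a time, deduplicating as it grows.
import Mathlib
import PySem

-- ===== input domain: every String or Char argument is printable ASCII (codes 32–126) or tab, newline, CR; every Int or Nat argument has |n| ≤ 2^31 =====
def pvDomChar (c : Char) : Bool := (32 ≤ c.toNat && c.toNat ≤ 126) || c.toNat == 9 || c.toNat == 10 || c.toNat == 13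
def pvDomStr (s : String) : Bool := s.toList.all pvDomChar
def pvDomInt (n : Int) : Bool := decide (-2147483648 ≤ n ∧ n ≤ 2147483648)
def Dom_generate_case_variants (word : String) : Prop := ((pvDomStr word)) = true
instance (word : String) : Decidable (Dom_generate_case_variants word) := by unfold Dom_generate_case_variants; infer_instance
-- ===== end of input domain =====

-- B rebuilds the variant set incrementally (cross-extending an accumulator set one character
-- at a time) instead of A's collect-all-options lists followed by one itertools.product pass;
-- objective: alternative decomposition, same cost.

-- ===== PORT A =====
-- the per-character options list A appends to `possibilities`
def pvOptsA (ch : Char) : List Char :=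
  if PySem.Chars.isalpha ch then [PySem.Chars.lowerChar ch, PySem.Chars.upperChar ch] else [ch]

-- hand port of itertools.product(*possibilities): exact (leftmost factor varies slowest)
def pvProduct : List (List Char) → List (List Char)
  | [] => [[]]
  | l :: ls => l.flatMap (fun x => (pvProduct ls).map (fun p => x :: p))

def generate_case_variants (word : String) : List String :=
  PySem.Set.ofList ((pvProduct (word.toList.map pvOptsA)).map String.ofList)

-- ===== PORT B =====
-- the per-character options list B builds (single-character strings, as in Source B)
def pvOptsB (ch : Char) : List String :=
  if PySem.Chars.isalpha ch then
    [String.ofList [PySem.Chars.lowerChar ch], String.ofList [PySem.Chars.upperChar ch]]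
  else [String.ofList [ch]]

def generate_case_variants_alt (word : String) : List String :=
  word.toList.foldl
    (fun result ch => PySem.Set.ofList (result.flatMap fun pre => (pvOptsB ch).map fun c => pre ++ c))
    [""]

-- ===== PRECONDITION & SPEC =====
def Spec_generate_case_variants (word : String) (out : List String) : Prop := out = generate_case_variants_alt word
instance (word : String) (out : List String) : Decidable (Spec_generate_case_variants word out) := by unfold Spec_generate_case_variants; infer_instance

-- ===== CLAIM (what is proved, stated in full; the proofs are below) =====
def Claim_equal_generate_case_variants : Prop := ∀ (word : String), Dom_generate_case_variants word → Spec_generate_case_variants word (generate_case_variants word)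

-- ===== LEMMAS AND PROOFS =====

theorem pv_upper_bounds {c : Char} (h : PySem.Chars.isupper c = true) :
    65 ≤ c.toNat ∧ c.toNat ≤ 90 := by
  unfold PySem.Chars.isupper at h
  simp only [Bool.and_eq_true, decide_eq_true_eq, Char.le_def, UInt32.le_iff_toNat_le] at h
  have hA : ('A' : Char).val.toNat = 65 := rfl
  have hZ : ('Z' : Char).val.toNat = 90 := rfl
  unfold Char.toNat
  omega

theorem pv_lower_bounds {c : Char} (h : PySem.Chars.islower c = true) :
    97 ≤ c.toNat ∧ c.toNat ≤ 122 := by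
  unfold PySem.Chars.islower at h
  simp only [Bool.and_eq_true, decide_eq_true_eq, Char.le_def, UInt32.le_iff_toNat_le] at h
  have ha : ('a' : Char).val.toNat = 97 := rfl
  have hz : ('z' : Char).val.toNat = 122 := rfl
  unfold Char.toNat
  omega

theorem pv_islower_false_of_isupper {c : Char} (h : PySem.Chars.isupper c = true) :
    PySem.Chars.islower c = false := by
  cases hl : PySem.Chars.islower c
  · rfl
  · have h1 := pv_upper_bounds h
    have h2 := pv_lower_bounds hl
    omega

theorem pv_isupper_false_of_islower {c : Char} (h : PySem.Chars.islower c = true) :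
    PySem.Chars.isupper c = false := by
  cases hu : PySem.Chars.isupper c
  · rfl
  · have h1 := pv_upper_bounds hu
    have h2 := pv_lower_bounds h
    omega

theorem pv_lowerChar_toNat {c : Char} (h : PySem.Chars.isupper c = true) :
    (PySem.Chars.lowerChar c).toNat = c.toNat + 32 := by
  obtain ⟨h1, h2⟩ := pv_upper_bounds h
  have hv : (c.toNat + 32).isValidChar := Or.inl (by omega)
  unfold PySem.Chars.lowerChar
  rw [if_pos h, Char.toNat_ofNat, if_pos hv]

theorem pv_upperChar_toNat {c : Char} (h : PySem.Chars.islower c = true) :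
    (PySem.Chars.upperChar c).toNat = c.toNat - 32 := by
  obtain ⟨h1, h2⟩ := pv_lower_bounds h
  have hv : (c.toNat - 32).isValidChar := Or.inl (by omega)
  unfold PySem.Chars.upperChar
  rw [if_pos h, Char.toNat_ofNat, if_pos hv]

theorem pv_lower_ne_upper (c : Char) (h : PySem.Chars.isalpha c = true) :
    PySem.Chars.lowerChar c ≠ PySem.Chars.upperChar c := by
  unfold PySem.Chars.isalpha at h
  rcases (by simpa using h : PySem.Chars.isupper c = true ∨ PySem.Chars.islower c = true) with hu | hl
  · have hb := pv_upper_bounds hu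
    have h1 := pv_lowerChar_toNat hu
    have h2 : PySem.Chars.upperChar c = c := by
      unfold PySem.Chars.upperChar
      rw [pv_islower_false_of_isupper hu]
      simp
    intro heq
    rw [h2] at heq
    have := congrArg Char.toNat heq
    omega
  · have hb := pv_lower_bounds hl
    have h1 := pv_upperChar_toNat hl
    have h2 : PySem.Chars.lowerChar c = c := by
      unfold PySem.Chars.lowerChar
      rw [pv_isupper_false_of_islower hl]
      simp
    intro heq
    rw [h2] at heq
    have := congrArg Char.toNat heq
    omega

theorem pvOptsA_nodup (c : Char) : (pvOptsA c).Nodup := by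
  unfold pvOptsA
  split
  · next h => simp [pv_lower_ne_upper c h]
  · simp

theorem pvOptsB_eq (c : Char) :
    pvOptsB c = (pvOptsA c).map (fun x => String.ofList [x]) := by
  unfold pvOptsA pvOptsB
  by_cases h : PySem.Chars.isalpha c = true <;> simp [h]

-- the B loop body with the deduplication stripped, on the List Char level
def pvStepL (acc : List (List Char)) (ch : Char) : List (List Char) :=
  acc.flatMap fun p => (pvOptsA ch).map fun x => p ++ [x]

theorem pvStepL_nodup {acc : List (List Char)} (ch : Char) (h : acc.Nodup) :
    (pvStepL acc ch).Nodup := by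
  unfold pvStepL
  rw [List.nodup_flatMap]
  refine ⟨fun p _ => (pvOptsA_nodup ch).map (fun x y hxy => by simpa using hxy), ?_⟩
  refine h.imp ?_
  intro p q hpq s hs ht
  simp only [List.mem_map] at hs ht
  obtain ⟨x, _, rfl⟩ := hs
  obtain ⟨y, _, hy⟩ := ht
  have hqp : q = p ∧ y = x := by simpa using hy
  exact hpq hqp.1.symm

theorem pvProduct_nodup : ∀ ls : List (List Char), (∀ l ∈ ls, l.Nodup) → (pvProduct ls).Nodup
  | [], _ => by simp [pvProduct]
  | l :: ls, h => by
    simp only [pvProduct]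
    rw [List.nodup_flatMap]
    refine ⟨fun x _ => (pvProduct_nodup ls (fun a ha => h a (List.mem_cons_of_mem _ ha))).map
      (fun p q hpq => by simpa using hpq), ?_⟩
    refine (h l (by simp)).imp ?_
    intro x y hxy s hs ht
    simp only [List.mem_map] at hs ht
    obtain ⟨p, _, rfl⟩ := hs
    obtain ⟨q, _, hq⟩ := ht
    have hyx : y = x ∧ q = p := by simpa using hq
    exact hxy hyx.1.symm

theorem pv_prodFold : ∀ (cs : List Char) (acc : List (List Char)),
    cs.foldl pvStepL acc = acc.flatMap (fun p => (pvProduct (cs.map pvOptsA)).map (fun q => p ++ q))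
  | [], acc => by simp [pvProduct]
  | c :: cs, acc => by
    simp only [List.foldl_cons, List.map_cons]
    rw [pv_prodFold cs (pvStepL acc c)]
    simp [pvStepL, pvProduct, List.flatMap_assoc, List.flatMap_map, List.map_flatMap,
      List.map_map, Function.comp_def, List.append_assoc]

theorem pv_altFold : ∀ (cs : List Char) (acc : List (List Char)), acc.Nodup →
    cs.foldl
      (fun result ch => PySem.Set.ofList (result.flatMap fun pre => (pvOptsB ch).map fun c => pre ++ c))
      (acc.map String.ofList)
    = (cs.foldl pvStepL acc).map String.ofList
  | [], _, _ => by simp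
  | c :: cs, acc, h => by
    simp only [List.foldl_cons]
    have hstep : (acc.map String.ofList).flatMap (fun pre => (pvOptsB c).map fun s => pre ++ s)
        = (pvStepL acc c).map String.ofList := by
      simp [pvOptsB_eq, pvStepL, List.flatMap_map, List.map_flatMap, List.map_map,
        Function.comp_def, String.ofList_append]
    rw [hstep,
      PySem.Set.ofList_eq_self_of_nodup _
        ((pvStepL_nodup c h).map (fun a b hab => String.ofList_inj.mp hab)),
      pv_altFold cs _ (pvStepL_nodup c h)]

-- ===== VERDICT (by name: the statement is the Claim_ definition above) =====
theorem generate_case_variants_spec : Claim_equal_generate_case_variants := by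
  intro word _
  unfold Spec_generate_case_variants generate_case_variants generate_case_variants_alt
  have hnd : ((pvProduct (word.toList.map pvOptsA)).map String.ofList).Nodup := by
    refine List.Nodup.map (fun a b hab => String.ofList_inj.mp hab) ?_
    refine pvProduct_nodup _ ?_
    intro l hl
    simp only [List.mem_map] at hl
    obtain ⟨ch, _, rfl⟩ := hl
    exact pvOptsA_nodup ch
  rw [PySem.Set.ofList_eq_self_of_nodup _ hnd]
  have h0 : ([""] : List String) = ([([] : List Char)]).map String.ofList := rfl
  rw [h0, pv_altFold word.toList [[]] (by simp), pv_prodFold]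
  simp
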